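-- pv_equiv track=rewrite | github.com/pydevhari/CodeEdit-Project-Tkinter | project_explorer.py | file_folder_name_validator
-- ===== SOURCE A (Python) =====
-- def file_folder_name_validator(file_dir_name):
--     """File and Folder name validator. If name is valid then return True otherwise return False."""
--     if not len(file_dir_name) is 0 and not file_dir_name.isspace():
--         for i in '\\/?<>*|':
--             if i in file_dir_name:
--                 return False
--         return True
--     else:
--         return False
-- ===== SOURCE B (Python) =====
-- def file_folder_name_validator(file_dir_name):
--     """File and Folder name validator. If name is valid then return True otherwise return False."""
--     has_visible = False
--     for ch in file_dir_name:
--         if ch in '\\/?<>*|':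
--             return False
--         if not ch.isspace():
--             has_visible = True
--     return has_visible
-- ===== Notes on version B (the rewrite author's own statement) =====
-- stated objective: alternative
-- what changed: B makes a single pass over the name's characters with a has_visible accumulator (early False on a forbidden char, flag set on any non-space char, flag returned), replacing A's staged len/isspace guard followed by a loop over the 7 forbidden characters with a substring scan for each.
import Mathlib
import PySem

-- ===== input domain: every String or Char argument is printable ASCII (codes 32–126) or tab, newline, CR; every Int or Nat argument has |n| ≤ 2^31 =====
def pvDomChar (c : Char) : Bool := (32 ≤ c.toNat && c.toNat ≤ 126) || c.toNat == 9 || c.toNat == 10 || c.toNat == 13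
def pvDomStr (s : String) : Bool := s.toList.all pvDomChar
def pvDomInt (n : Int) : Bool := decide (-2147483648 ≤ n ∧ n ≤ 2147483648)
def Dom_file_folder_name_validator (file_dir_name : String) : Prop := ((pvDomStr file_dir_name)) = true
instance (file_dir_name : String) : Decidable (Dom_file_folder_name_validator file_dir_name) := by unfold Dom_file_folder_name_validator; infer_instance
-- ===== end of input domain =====

-- B replaces A's staged guard + loop over the 7 forbidden characters by one single
-- pass over the name with a has_visible accumulator (alternative decomposition).

-- ===== PORT A =====
-- the literal '\\/?<>*|' as a list of characters, scanned left to right with early return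
def pvScanA (name : List Char) : List Char → Bool
  | [] => true
  | c :: rest => if PySem.Chars.isIn [c] name then false else pvScanA name rest

def file_folder_name_validator (file_dir_name : String) : Bool :=
  if PySem.Str.len file_dir_name != 0 && !PySem.Str.strIsspace file_dir_name then
    pvScanA file_dir_name.toList ['\\', '/', '?', '<', '>', '*', '|']
  else
    false

-- ===== PORT B =====
-- B's single for-loop: early return False on a forbidden char, otherwise carry has_visible
def pvScanB (hasVisible : Bool) : List Char → Bool
  | [] => hasVisible
  | c :: rest =>
    if PySem.Chars.isIn [c] ['\\', '/', '?', '<', '>', '*', '|'] then false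
    else pvScanB (if !PySem.Chars.isspace c then true else hasVisible) rest

def file_folder_name_validator_alt (file_dir_name : String) : Bool :=
  pvScanB false file_dir_name.toList

-- ===== PRECONDITION & SPEC =====
def Spec_file_folder_name_validator (file_dir_name : String) (out : Bool) : Prop := out = file_folder_name_validator_alt file_dir_name
instance (file_dir_name : String) (out : Bool) : Decidable (Spec_file_folder_name_validator file_dir_name out) := by unfold Spec_file_folder_name_validator; infer_instance

-- ===== CLAIM =====
def Claim_equal_file_folder_name_validator : Prop := ∀ (file_dir_name : String), Dom_file_folder_name_validator file_dir_name → Spec_file_folder_name_validator file_dir_name (file_folder_name_validator file_dir_name)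

-- ===== LEMMAS AND PROOFS =====

-- a single-character substring test is membership
theorem pvSingleton_isIn (a : Char) (l : List Char) :
    PySem.Chars.isIn [a] l = l.contains a := by
  cases h : l.contains a
  · refine (PySem.Chars.isIn_eq_false_iff _ _).mpr ?_
    intro hinf
    have : a ∈ l := hinf.mem (List.mem_singleton_self a)
    simp_all
  · refine (PySem.Chars.isIn_iff_infix _ _).mpr ?_
    have ha : a ∈ l := by simpa using h
    obtain ⟨p, q, rfl⟩ := List.mem_iff_append.mp ha
    exact ⟨p, q, by simp⟩

def pvForb : List Char := ['\\', '/', '?', '<', '>', '*', '|']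

-- B's scan in closed form
theorem pvScanB_eq (b : Bool) (cs : List Char) :
    pvScanB b cs =
      (!cs.any (fun c => pvForb.contains c) &&
        (b || cs.any (fun c => !PySem.Chars.isspace c))) := by
  induction cs generalizing b with
  | nil => simp [pvScanB]
  | cons c rest ih =>
    simp only [pvScanB, pvSingleton_isIn, List.any_cons]
    by_cases h : pvForb.contains c = true
    · simp [pvForb] at h ⊢
      rcases h with h|h|h|h|h|h|h <;> simp [h]
    · have h' : pvForb.contains c = false := by simpa using h
      have hc : (['\\', '/', '?', '<', '>', '*', '|'] : List Char).contains c = false := h'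
      rw [hc, ih]
      simp only [h', Bool.false_or]
      cases hs : PySem.Chars.isspace c <;> cases b <;> simp

-- A's scan over the forbidden characters succeeds iff no forbidden character occurs in the name
theorem pvScanA_eq (name : List Char) (fs : List Char) :
    pvScanA name fs = !fs.any (fun c => name.contains c) := by
  induction fs with
  | nil => simp [pvScanA]
  | cons c rest ih =>
    simp only [pvScanA, pvSingleton_isIn, List.any_cons, ih]
    cases h : name.contains c <;> simp

-- symmetry of "some character of the name is forbidden"
theorem pvAny_comm (cs fs : List Char) :
    fs.any (fun c => cs.contains c) = cs.any (fun c => fs.contains c) := by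
  cases h : cs.any (fun c => fs.contains c)
  · simp only [List.any_eq_false] at h ⊢
    intro c hc hmem
    have := h c (by simpa using hmem)
    simp_all
  · simp only [List.any_eq_true] at h ⊢
    obtain ⟨c, hc, hmem⟩ := h
    exact ⟨c, by simpa using hmem, by simpa using hc⟩

-- A's emptiness/whitespace guard says: some character is not whitespace
theorem pvGuard_eq (s : String) :
    (PySem.Str.len s != 0 && !PySem.Str.strIsspace s) =
      s.toList.any (fun c => !PySem.Chars.isspace c) := by
  simp only [PySem.Str.len_eq, PySem.Str.strIsspace_eq, PySem.Chars.strIsspace]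
  cases hs : s.toList with
  | nil => simp
  | cons c rest =>
    simp [List.all_eq_not_any_not]
    exact fun _ => by omega

-- ===== VERDICT =====
theorem file_folder_name_validator_spec : Claim_equal_file_folder_name_validator := by
  intro s _
  unfold Spec_file_folder_name_validator file_folder_name_validator file_folder_name_validator_alt
  rw [pvScanB_eq, pvGuard_eq, Bool.false_or]
  cases hf : s.toList.any (fun c => pvForb.contains c)
  · have : pvScanA s.toList ['\\', '/', '?', '<', '>', '*', '|'] = true := by
      rw [pvScanA_eq, pvAny_comm]
      simpa [pvForb] using hf
    simp only [Bool.not_false, Bool.true_and]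
    cases hg : s.toList.any (fun c => !PySem.Chars.isspace c) <;> simp [this]
  · have : pvScanA s.toList ['\\', '/', '?', '<', '>', '*', '|'] = false := by
      rw [pvScanA_eq, pvAny_comm]
      simpa [pvForb] using hf
    simp only [Bool.not_true, Bool.false_and]
    cases hg : s.toList.any (fun c => !PySem.Chars.isspace c) <;> simp [this]
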